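-- pv_equiv track=rewrite | github.com/Shreyaskrishnareddy/demo-resumeparser | fixed_comprehensive_parser.py | _merge_education_entries
-- ===== SOURCE A (Python) =====
-- from typing import Dict, List, Optional, Any
--
-- def _merge_education_entries(education_list: List[Dict[str, Any]]) -> List[Dict[str, Any]]:
--     """Merge related education entries (degrees with their institutions)"""
--     merged = []
--     used_indices = set()
--
--     for i, entry in enumerate(education_list):
--         if i in used_indices:
--             continue
--
--         # If this entry has a degree but no institution, look for following institution
--         if entry.get('Degree') and not entry.get('Institution'):
--             for j, other_entry in enumerate(education_list[i+1:], i+1):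
--                 if (j not in used_indices and
--                     other_entry.get('Institution') and
--                     not other_entry.get('Degree')):
--                     # Merge the entries
--                     merged_entry = entry.copy()
--                     merged_entry['Institution'] = other_entry['Institution']
--                     merged_entry['School'] = other_entry['School']
--                     if other_entry.get('Location'):
--                         merged_entry['Location'] = other_entry['Location']
--                     merged.append(merged_entry)
--                     used_indices.add(i)
--                     used_indices.add(j)
--                     break
--             else:
--                 # No matching institution found, keep as is
--                 merged.append(entry)
--                 used_indices.add(i)
--         else:
--             # Entry has both degree and institution, or is institution-only
--             if not (i in used_indices):
--                 merged.append(entry)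
--                 used_indices.add(i)
--
--     # Remove entries with no degree and no institution
--     merged = [entry for entry in merged if entry.get('Degree') or entry.get('Institution')]
--
--     return merged
-- ===== SOURCE B (Python) =====
-- from typing import Dict, List, Any
--
-- def _merge_education_entries(education_list: List[Dict[str, Any]]) -> List[Dict[str, Any]]:
--     """Single forward pass: unmatched degree-only entries wait in a FIFO queue of
--     output positions; each institution-only entry merges into the earliest waiting
--     degree-only entry (or is kept if none is waiting)."""
--     out = []
--     pending = []  # positions in `out` of degree-only entries still awaiting an institution
--     for entry in education_list:
--         deg = bool(entry.get('Degree'))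
--         inst = bool(entry.get('Institution'))
--         if deg and not inst:
--             pending.append(len(out))
--             out.append(entry)
--         elif inst and not deg and pending:
--             k = pending.pop(0)
--             merged_entry = dict(out[k])
--             merged_entry['Institution'] = entry['Institution']
--             merged_entry['School'] = entry['School']
--             if entry.get('Location'):
--                 merged_entry['Location'] = entry['Location']
--             out[k] = merged_entry
--         else:
--             out.append(entry)
--     return [e for e in out if e.get('Degree') or e.get('Institution')]
-- ===== Notes on version B (the rewrite author's own statement) =====
-- stated objective: alternative
-- what changed: A rescans the remaining tail (guarded by a used-index set) for every degree-only entry; B does one forward pass keeping a FIFO queue of unmatched degree-only entries and merges each institution-only entry into the earliest queued one, eliminating the inner scan (quadratic only on adversarial inputs, so no measured speed-up).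
-- outside the precondition, e.g. on _merge_education_entries([{'Institution': 'X'}]): A returns [{'Institution': 'X'}], B returns [{'Institution': 'X'}]
import Mathlib
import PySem

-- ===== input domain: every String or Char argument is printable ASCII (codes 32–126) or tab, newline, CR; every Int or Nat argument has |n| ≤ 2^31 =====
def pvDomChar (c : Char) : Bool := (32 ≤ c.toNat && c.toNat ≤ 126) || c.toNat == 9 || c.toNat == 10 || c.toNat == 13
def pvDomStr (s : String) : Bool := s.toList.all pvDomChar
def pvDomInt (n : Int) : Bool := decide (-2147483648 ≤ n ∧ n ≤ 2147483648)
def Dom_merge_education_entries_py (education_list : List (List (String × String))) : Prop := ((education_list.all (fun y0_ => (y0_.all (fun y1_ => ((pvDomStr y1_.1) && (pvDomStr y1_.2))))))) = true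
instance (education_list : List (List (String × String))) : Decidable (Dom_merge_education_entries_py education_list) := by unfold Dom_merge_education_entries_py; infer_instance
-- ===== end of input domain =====

-- B replaces A's per-entry forward rescan (with a used-index set) by a single forward pass
-- with a FIFO queue of unmatched degree-only entries; return values are proved equal on Pre_.

-- ===== PORT A =====

-- truthiness of entry.get(k) (missing key or "" is falsy); shared by both ports and Pre_
def pvGetT (e : List (String × String)) (k : String) : Bool :=
  !(((PySem.Dict.mk e).getD k "") == "")

-- the identical merge block of A and B: copy of the degree entry, then
-- m['Institution'], m['School'] (key present under Pre_; getD is exact there), optional m['Location']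
def pvMergePair (e o : List (String × String)) : List (String × String) :=
  let m := PySem.Dict.mk e
  let m := m.insert "Institution" ((PySem.Dict.mk o).getD "Institution" "")
  let m := m.insert "School" ((PySem.Dict.mk o).getD "School" "")
  let m := if pvGetT o "Location" then m.insert "Location" ((PySem.Dict.mk o).getD "Location" "") else m
  m.items

-- A's inner for/else loop: first j ∉ used with other_entry institution-only
def mergeEduA_find (used : PySem.Set Int) : List (Int × List (String × String)) → Option (Int × List (String × String))
  | [] => none
  | p :: rest =>
      if !(PySem.Set.contains used p.1) && pvGetT p.2 "Institution" && !pvGetT p.2 "Degree" then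
        some p
      else mergeEduA_find used rest

-- A's outer loop body
def pvAStep (xs : List (List (String × String)))
    (st : List (List (String × String)) × PySem.Set Int)
    (p : Int × List (String × String)) : List (List (String × String)) × PySem.Set Int :=
  if PySem.Set.contains st.2 p.1 then st
  else if pvGetT p.2 "Degree" && !pvGetT p.2 "Institution" then
    match mergeEduA_find st.2 (PySem.List.enumerate (PySem.List.slice xs (some (p.1 + 1)) none) (p.1 + 1)) with
    | some jo => (st.1 ++ [pvMergePair p.2 jo.2], PySem.Set.add (PySem.Set.add st.2 p.1) jo.1)
    | none => (st.1 ++ [p.2], PySem.Set.add st.2 p.1)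
  else
    if !(PySem.Set.contains st.2 p.1) then (st.1 ++ [p.2], PySem.Set.add st.2 p.1) else st

def merge_education_entries_py (education_list : List (List (String × String))) : List (List (String × String)) :=
  (((PySem.List.enumerate education_list 0).foldl (pvAStep education_list) ([], PySem.Set.empty)).1).filter
    (fun e => pvGetT e "Degree" || pvGetT e "Institution")

-- ===== PORT B =====

-- B's loop body: queue `pending` of positions in `out`
def pvBStep (st : List (List (String × String)) × List Int)
    (e : List (String × String)) : List (List (String × String)) × List Int :=
  let deg := pvGetT e "Degree"
  let inst := pvGetT e "Institution"
  if deg && !inst then (st.1 ++ [e], st.2 ++ [(st.1.length : Int)])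
  else if inst && !deg then
    match st.2 with
    | k :: pend' => (PySem.List.pySetD st.1 k (pvMergePair (PySem.List.pyGetD st.1 k []) e), pend')
    | [] => (st.1 ++ [e], st.2)
  else (st.1 ++ [e], st.2)

def merge_education_entries_py_alt (education_list : List (List (String × String))) : List (List (String × String)) :=
  ((education_list.foldl pvBStep ([], [])).1).filter
    (fun e => pvGetT e "Degree" || pvGetT e "Institution")

-- ===== PRECONDITION & SPEC =====
-- Pre_ excludes inputs containing an institution-only entry without a 'School' key:
-- if such an entry is picked for a merge, A (and B) raise KeyError at other_entry['School'];
-- the condition is slightly wider than the raising set (an unmatched such entry returns normally).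
def Pre_merge_education_entries_py (education_list : List (List (String × String))) : Prop :=
  ∀ e ∈ education_list,
    (pvGetT e "Institution" && !pvGetT e "Degree") = true →
    (PySem.Dict.mk e).contains "School" = true

instance (education_list : List (List (String × String))) : Decidable (Pre_merge_education_entries_py education_list) := by unfold Pre_merge_education_entries_py; infer_instance

def pvWitness_merge_education_entries_py : (List (List (String × String))) :=
  [[("Degree", "BS")], [("Institution", "MIT"), ("School", "MIT")]]

def Spec_merge_education_entries_py (education_list : List (List (String × String))) (out : List (List (String × String))) : Prop := out = merge_education_entries_py_alt education_list
instance (education_list : List (List (String × String))) (out : List (List (String × String))) : Decidable (Spec_merge_education_entries_py education_list out) := by unfold Spec_merge_education_entries_py; infer_instance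

-- ===== CLAIM (what is proved, stated in full; the proofs are below) =====
def Claim_equal_merge_education_entries_py : Prop := ∀ (education_list : List (List (String × String))), Dom_merge_education_entries_py education_list → Pre_merge_education_entries_py education_list → Spec_merge_education_entries_py education_list (merge_education_entries_py education_list)

-- ===== LEMMAS AND PROOFS =====

-- entry classifiers used by the intermediate characterisations
def pvDegOnly (e : List (String × String)) : Bool := pvGetT e "Degree" && !pvGetT e "Institution"
def pvInstOnly (e : List (String × String)) : Bool := pvGetT e "Institution" && !pvGetT e "Degree"

-- index-free characterisation of A's loop: a degree-only head merges with the
-- first institution-only element of the rest (which is removed), otherwise keep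
def pvFRec : List (List (String × String)) → List (List (String × String))
  | [] => []
  | e :: rest =>
    if pvDegOnly e then
      match h : rest.dropWhile (fun x => !pvInstOnly x) with
      | o :: post => pvMergePair e o :: pvFRec (rest.takeWhile (fun x => !pvInstOnly x) ++ post)
      | [] => e :: pvFRec rest
    else e :: pvFRec rest
termination_by l => l.length
decreasing_by
  · have h1 := List.takeWhile_append_dropWhile (p := fun x => !pvInstOnly x) (l := rest)
    have h2 : (rest.takeWhile (fun x => !pvInstOnly x)).length + (rest.dropWhile (fun x => !pvInstOnly x)).length = rest.length := by
      rw [← List.length_append, h1]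
    simp [h] at h2
    simp [List.length_append]
    omega
  · simp
  · simp

-- queue characterisation of B: phi xs q = (final values of the queued degree-only
-- entries q, output contributed by xs)
def pvPhi : List (List (String × String)) → List (List (String × String)) →
    List (List (String × String)) × List (List (String × String))
  | [], q => (q, [])
  | x :: xs, q =>
    if pvDegOnly x then
      let rt := pvPhi xs (q ++ [x])
      (rt.1.take q.length, rt.1.drop q.length ++ rt.2)
    else if pvInstOnly x then
      match q with
      | k :: q' => let rt := pvPhi xs q'; (pvMergePair k x :: rt.1, rt.2)
      | [] => let rt := pvPhi xs []; (rt.1, x :: rt.2)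
    else
      let rt := pvPhi xs q; (rt.1, x :: rt.2)

-- the elements of l at positions (from i) not in used
def pvMask (i : Int) (used : PySem.Set Int) : List (List (String × String)) → List (List (String × String))
  | [] => []
  | e :: l => if PySem.Set.contains used i then pvMask (i + 1) used l else e :: pvMask (i + 1) used l

-- write the values r into out at the positions pend
def pvPatch (out : List (List (String × String))) (pend : List Int) (r : List (List (String × String))) : List (List (String × String)) :=
  (pend.zip r).foldl (fun o p => o.set p.1.toNat p.2) out


theorem pvDeg_not_inst (e : List (String × String)) (h : pvDegOnly e = true) : pvInstOnly e = false := by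
  unfold pvDegOnly at h; unfold pvInstOnly
  cases hd : pvGetT e "Degree" <;> cases hi : pvGetT e "Institution" <;> simp_all

theorem pvFRec_all_deg (q : List (List (String × String)))
    (hq : ∀ e ∈ q, pvDegOnly e = true) : pvFRec q = q := by
  induction q with
  | nil => rw [pvFRec]
  | cons e rest ih =>
    have hdrop : rest.dropWhile (fun x => !pvInstOnly x) = [] := by
      rw [List.dropWhile_eq_nil_iff]
      intro x hx
      simp [pvDeg_not_inst x (hq x (List.mem_cons_of_mem _ hx))]
    rw [pvFRec]
    rw [hq e List.mem_cons_self]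
    simp only [if_true]
    split
    · next h => rw [hdrop] at h; exact absurd h (by simp)
    · rw [ih (fun x hx => hq x (List.mem_cons_of_mem _ hx))]

theorem pvPhi_fst_length (xs : List (List (String × String))) :
    ∀ q, (pvPhi xs q).1.length = q.length := by
  induction xs with
  | nil => intro q; rfl
  | cons x xs ih =>
    intro q
    rw [pvPhi.eq_def]
    by_cases hd : pvDegOnly x = true
    · simp only [hd, if_true]
      have := ih (q ++ [x])
      simp [List.length_take, this]
    · by_cases hi : pvInstOnly x = true
      · rcases q with _ | ⟨k, q'⟩ <;> simp [hd, hi, ih]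
      · simp [hd, hi, ih]

theorem pvAllDeg_pred (q : List (List (String × String))) (hq : ∀ e ∈ q, pvDegOnly e = true) :
    ∀ a ∈ q, (fun x => !pvInstOnly x) a = true := by
  intro a ha; simp [pvDeg_not_inst a (hq a ha)]

-- inserting a non-degree-only, non-institution-only element after the queued prefix
-- inserts it verbatim at that position of the output
theorem pvFRec_insert_aux : ∀ (n : Nat) (q xs : List (List (String × String))) (x : List (String × String)),
    q.length + xs.length ≤ n →
    (∀ e ∈ q, pvDegOnly e = true) → pvDegOnly x = false → pvInstOnly x = false →
    pvFRec (q ++ x :: xs) =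
      (pvFRec (q ++ xs)).take q.length ++ x :: (pvFRec (q ++ xs)).drop q.length := by
  intro n
  induction n with
  | zero =>
    intro q xs x hn hq hxd hxi
    rcases q with _ | _
    · simp only [List.nil_append]; rw [pvFRec, hxd]; simp
    · simp at hn
  | succ m ih =>
    intro q xs x hn hq hxd hxi
    rcases q with _ | ⟨k, q'⟩
    · simp only [List.nil_append]; rw [pvFRec, hxd]; simp
    · have hk : pvDegOnly k = true := hq k List.mem_cons_self
      have hq' : ∀ e ∈ q', pvDegOnly e = true := fun e he => hq e (List.mem_cons_of_mem _ he)
      have hpred' := pvAllDeg_pred q' hq'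
      have hdw : (q' ++ x :: xs).dropWhile (fun y => !pvInstOnly y) = xs.dropWhile (fun y => !pvInstOnly y) := by
        rw [List.dropWhile_append_of_pos hpred']
        rw [List.dropWhile_cons_of_pos (by simp [hxi])]
      have htw : (q' ++ x :: xs).takeWhile (fun y => !pvInstOnly y) = q' ++ x :: xs.takeWhile (fun y => !pvInstOnly y) := by
        rw [List.takeWhile_append_of_pos hpred']
        rw [List.takeWhile_cons_of_pos (by simp [hxi])]
      have hdw2 : (q' ++ xs).dropWhile (fun y => !pvInstOnly y) = xs.dropWhile (fun y => !pvInstOnly y) :=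
        List.dropWhile_append_of_pos hpred'
      have htw2 : (q' ++ xs).takeWhile (fun y => !pvInstOnly y) = q' ++ xs.takeWhile (fun y => !pvInstOnly y) :=
        List.takeWhile_append_of_pos hpred'
      rcases hxs : xs.dropWhile (fun y => !pvInstOnly y) with _ | ⟨o, post⟩
      · -- no institution-only in xs: both heads keep k
        rw [show (k :: q') ++ x :: xs = k :: (q' ++ x :: xs) by rfl, pvFRec, hk]
        simp only [if_true]
        split
        · next heq => rw [hdw, hxs] at heq; cases heq
        · rw [show (k :: q') ++ xs = k :: (q' ++ xs) by rfl, pvFRec, hk]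
          simp only [if_true]
          split
          · next heq => rw [hdw2, hxs] at heq; cases heq
          · have := ih q' xs x (by simp at hn ⊢; omega) hq' hxd hxi
            simp [this]
      · -- first institution-only of xs is o
        have hlen : (xs.takeWhile (fun y => !pvInstOnly y)).length + post.length + 1 = xs.length := by
          have h1 := List.takeWhile_append_dropWhile (p := fun y => !pvInstOnly y) (l := xs)
          have h2 : (xs.takeWhile (fun y => !pvInstOnly y)).length + (xs.dropWhile (fun y => !pvInstOnly y)).length = xs.length := by
            rw [← List.length_append, h1]
          rw [hxs] at h2; simp at h2; omega
        rw [show (k :: q') ++ x :: xs = k :: (q' ++ x :: xs) by rfl, pvFRec, hk]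
        simp only [if_true]
        split
        · next o' post' heq =>
          rw [hdw, hxs] at heq
          cases heq
          rw [htw]
          rw [show (k :: q') ++ xs = k :: (q' ++ xs) by rfl, pvFRec, hk]
          simp only [if_true]
          split
          · next o2 post2 heq2 =>
            rw [hdw2, hxs] at heq2
            cases heq2
            rw [htw2]
            have := ih q' (xs.takeWhile (fun y => !pvInstOnly y) ++ post) x
              (by simp at hn ⊢; omega) hq' hxd hxi
            simp only [List.append_assoc, List.cons_append] at this ⊢
            simp [this]
          · next heq2 => rw [hdw2, hxs] at heq2; cases heq2
        · next heq => rw [hdw, hxs] at heq; cases heq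

theorem pvFRec_phi (xs : List (List (String × String))) :
    ∀ q, (∀ e ∈ q, pvDegOnly e = true) →
      pvFRec (q ++ xs) = (pvPhi xs q).1 ++ (pvPhi xs q).2 := by
  induction xs with
  | nil =>
    intro q hq
    rw [pvPhi]
    simp [pvFRec_all_deg q hq]
  | cons x xs ih =>
    intro q hq
    rw [pvPhi.eq_def]
    by_cases hd : pvDegOnly x = true
    · simp only [hd, if_true]
      have hq2 : ∀ e ∈ q ++ [x], pvDegOnly e = true := by
        intro e he; rcases List.mem_append.1 he with h | h
        · exact hq e h
        · simp at h; subst h; exact hd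
      have := ih (q ++ [x]) hq2
      rw [show q ++ x :: xs = (q ++ [x]) ++ xs by simp] at *
      rw [this]
      simp [List.take_append_drop, ← List.append_assoc]
    · by_cases hi : pvInstOnly x = true
      · simp only [hd, if_false, hi, if_true]
        rcases q with _ | ⟨k, q'⟩
        · simp only [List.nil_append]
          rw [pvFRec, if_neg hd]
          have := ih [] (by intro e h; cases h)
          simp only [List.nil_append] at this
          have hr : (pvPhi xs ([] : List (List (String × String)))).1 = [] := by
            have := pvPhi_fst_length xs []
            simpa using List.eq_nil_of_length_eq_zero (by simpa using this)
          rw [hr] at this ⊢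
          simp_all
        · have hk : pvDegOnly k = true := hq k List.mem_cons_self
          have hq' : ∀ e ∈ q', pvDegOnly e = true := fun e he => hq e (List.mem_cons_of_mem _ he)
          have hpred' := pvAllDeg_pred q' hq'
          rw [show (k :: q') ++ x :: xs = k :: (q' ++ x :: xs) by rfl, pvFRec, hk]
          simp only [if_true]
          have hdw : (q' ++ x :: xs).dropWhile (fun y => !pvInstOnly y) = x :: xs := by
            rw [List.dropWhile_append_of_pos hpred']
            rw [List.dropWhile_cons_of_neg (by simp [hi])]
          have htw : (q' ++ x :: xs).takeWhile (fun y => !pvInstOnly y) = q' := by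
            rw [List.takeWhile_append_of_pos hpred']
            rw [List.takeWhile_cons_of_neg (by simp [hi])]
            simp
          split
          · next o post heq =>
            rw [hdw] at heq
            cases heq
            rw [htw]
            rw [ih q' hq']
            simp
          · next heq => rw [hdw] at heq; cases heq
      · simp only [hd, if_false, hi, if_false]
        have := pvFRec_insert_aux (q.length + xs.length) q xs x le_rfl hq (Bool.not_eq_true _ ▸ eq_false_of_ne_true hd) (Bool.not_eq_true _ ▸ eq_false_of_ne_true hi)
        rw [this, ih q hq]
        have hlen := pvPhi_fst_length xs q
        simp [List.take_append_drop, List.take_left' hlen, List.drop_left' hlen]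

theorem pvGetD_set_ne (l : List (List (String × String))) (i j : Nat) (v d : List (String × String)) (h : j ≠ i) :
    (l.set i v).getD j d = l.getD j d := by
  simp [List.getD, Ne.symm h]

theorem pvSet_getD_self (l : List (List (String × String))) (i : Nat) (d : List (String × String)) (h : i < l.length) :
    l.set i (l.getD i d) = l := by
  rw [List.getD_eq_getElem _ _ h]; exact List.set_getElem_self h

theorem pvPatch_length (pend : List Int) : ∀ (r : List (List (String × String))) (out : List (List (String × String))),
    (pvPatch out pend r).length = out.length := by
  unfold pvPatch
  induction pend with
  | nil => intro r out; rfl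
  | cons k pend ih =>
    intro r out
    rcases r with _ | ⟨v, r⟩
    · rfl
    · simp only [List.zip_cons_cons, List.foldl_cons]
      rw [ih]
      simp

theorem pvPatch_append (pend : List Int) : ∀ (r out ys : List (List (String × String))),
    (∀ k ∈ pend, 0 ≤ k ∧ k.toNat < out.length) →
    pvPatch (out ++ ys) pend r = pvPatch out pend r ++ ys := by
  induction pend with
  | nil => intro r out ys _; rfl
  | cons k pend ih =>
    intro r out ys hb
    rcases r with _ | ⟨v, r⟩
    · rfl
    · unfold pvPatch
      simp only [List.zip_cons_cons, List.foldl_cons]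
      rw [List.set_append_left _ _ (hb k List.mem_cons_self).2]
      exact ih r (out.set k.toNat v) ys (by
        intro j hj
        refine ⟨(hb j (List.mem_cons_of_mem _ hj)).1, ?_⟩
        simpa using (hb j (List.mem_cons_of_mem _ hj)).2)

theorem pvPatch_self (pend : List Int) : ∀ (out : List (List (String × String))),
    (∀ k ∈ pend, 0 ≤ k ∧ k.toNat < out.length) →
    pvPatch out pend (pend.map (fun k => out.getD k.toNat [])) = out := by
  induction pend with
  | nil => intro out _; rfl
  | cons k pend ih =>
    intro out hb
    unfold pvPatch
    simp only [List.map_cons, List.zip_cons_cons, List.foldl_cons]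
    rw [pvSet_getD_self _ _ _ (hb k List.mem_cons_self).2]
    exact ih out (fun j hj => hb j (List.mem_cons_of_mem _ hj))

theorem pvPatch_snoc (out pend r : _) (x : List (String × String))
    (hb : ∀ k ∈ pend, (0:Int) ≤ k ∧ k.toNat < out.length)
    (hr : r.length = pend.length + 1) :
    pvPatch (out ++ [x]) (pend ++ [(out.length : Int)]) r =
      pvPatch out pend (r.take pend.length) ++ r.drop pend.length := by
  have htake : (r.take pend.length).length = pend.length := by
    rw [List.length_take]; omega
  rcases hdrop : r.drop pend.length with _ | ⟨v, rest⟩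
  · have := List.length_drop (l := r) (i := pend.length); rw [hdrop] at this; simp at this; omega
  · have hrest : rest = [] := by
      have := List.length_drop (l := r) (i := pend.length); rw [hdrop] at this; simp at this
      exact List.eq_nil_of_length_eq_zero (by omega)
    subst hrest
    conv_lhs => rw [show r = r.take pend.length ++ r.drop pend.length by rw [List.take_append_drop], hdrop]
    unfold pvPatch
    rw [List.zip_append (by omega)]
    rw [List.foldl_append]
    rw [show ((pend.zip (r.take pend.length)).foldl (fun o p => o.set p.1.toNat p.2) (out ++ [x])) = pvPatch (out ++ [x]) pend (r.take pend.length) from rfl]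
    rw [pvPatch_append pend (r.take pend.length) out [x] hb]
    simp only [List.zip_cons_cons, List.zip_nil_right, List.foldl_cons, List.foldl_nil]
    rw [show ((out.length : Int)).toNat = out.length by simp]
    rw [← pvPatch_length pend (r.take pend.length) out]
    rw [List.set_append_right _ _ (le_refl _)]
    simp
    rfl

theorem pvB_inv (xs : List (List (String × String))) :
    ∀ (out : List (List (String × String))) (pend : List Int),
    (∀ k ∈ pend, (0:Int) ≤ k ∧ k.toNat < out.length) →
    pend.Pairwise (· < ·) →
    (xs.foldl pvBStep (out, pend)).1 =
      pvPatch out pend (pvPhi xs (pend.map (fun k => out.getD k.toNat []))).1 ++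
        (pvPhi xs (pend.map (fun k => out.getD k.toNat []))).2 := by
  induction xs with
  | nil =>
    intro out pend hb hp
    simp only [List.foldl_nil, pvPhi]
    rw [pvPatch_self pend out hb]
    simp
  | cons x xs ih =>
    intro out pend hb hp
    rw [List.foldl_cons, pvPhi.eq_def]
    by_cases hd : pvDegOnly x = true
    · -- degree-only: queue it
      have hstep : pvBStep (out, pend) x = (out ++ [x], pend ++ [(out.length : Int)]) := by
        unfold pvBStep pvDegOnly at *
        simp [hd]
      rw [hstep]
      simp only [hd, if_true]
      have hb' : ∀ k ∈ pend ++ [(out.length : Int)], (0:Int) ≤ k ∧ k.toNat < (out ++ [x]).length := by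
        intro k hk
        rcases List.mem_append.1 hk with h | h
        · have := hb k h; constructor; · exact this.1
          simp; omega
        · simp at h; subst h; simp
      have hp' : (pend ++ [(out.length : Int)]).Pairwise (· < ·) := by
        rw [List.pairwise_append]
        refine ⟨hp, List.pairwise_singleton _ _, ?_⟩
        intro a ha b hb2
        simp at hb2; subst hb2
        have := hb a ha; omega
      have hq : (pend ++ [(out.length : Int)]).map (fun k => (out ++ [x]).getD k.toNat []) =
          pend.map (fun k => out.getD k.toNat []) ++ [x] := by
        rw [List.map_append]
        congr 1
        · apply List.map_congr_left
          intro k hk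
          exact List.getD_append _ _ _ _ (hb k hk).2
        · simp
      have := ih (out ++ [x]) (pend ++ [(out.length : Int)]) hb' hp'
      rw [hq] at this
      rw [this]
      have hlen := pvPhi_fst_length xs (pend.map (fun k => out.getD k.toNat []) ++ [x])
      rw [pvPatch_snoc out pend _ x hb (by simp at hlen ⊢; omega)]
      simp [List.append_assoc, List.length_map]
    · by_cases hi : pvInstOnly x = true
      · have hD : pvGetT x "Degree" = false := by
          unfold pvInstOnly at hi; cases h : pvGetT x "Degree" <;> simp_all
        have hI : pvGetT x "Institution" = true := by
          unfold pvInstOnly at hi; cases h : pvGetT x "Institution" <;> simp_all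
        rcases pend with _ | ⟨k, pend'⟩
        · -- empty queue: keep the entry
          have hstep : pvBStep (out, ([] : List Int)) x = (out ++ [x], []) := by
            unfold pvBStep
            simp [hD, hI]
          rw [hstep]
          simp only [hi, if_true, if_neg hd]
          have := ih (out ++ [x]) [] (by intro k hk; cases hk) List.Pairwise.nil
          simp only [List.map_nil] at this ⊢
          rw [this]
          unfold pvPatch
          simp
        · -- merge into the earliest queued degree-only entry
          have hk0 := (hb k List.mem_cons_self).1
          have hklt := (hb k List.mem_cons_self).2
          have hstep : pvBStep (out, k :: pend') x =
              (out.set k.toNat (pvMergePair (out.getD k.toNat []) x), pend') := by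
            unfold pvBStep
            simp [hD, hI]
            rw [PySem.List.pySetD_of_nonneg _ _ hk0, PySem.List.pyGetD_of_nonneg _ _ hk0]
            simp [List.getD]
          rw [hstep]
          simp only [hi, if_true, if_neg hd, List.map_cons]
          have hb' : ∀ j ∈ pend', (0:Int) ≤ j ∧ j.toNat < (out.set k.toNat (pvMergePair (out.getD k.toNat []) x)).length := by
            intro j hj
            have := hb j (List.mem_cons_of_mem _ hj)
            simpa using this
          have hp' := hp.of_cons
          have hq : pend'.map (fun j => (out.set k.toNat (pvMergePair (out.getD k.toNat []) x)).getD j.toNat []) =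
              pend'.map (fun j => out.getD j.toNat []) := by
            apply List.map_congr_left
            intro j hj
            have hkj : k < j := (List.pairwise_cons.1 hp).1 j hj
            have hj0 := (hb j (List.mem_cons_of_mem _ hj)).1
            exact pvGetD_set_ne _ _ _ _ _ (by omega)
          have := ih (out.set k.toNat (pvMergePair (out.getD k.toNat []) x)) pend' hb' hp'
          rw [hq] at this
          rw [this]
          unfold pvPatch
          simp
      · -- neither: keep the entry
        have hstep : pvBStep (out, pend) x = (out ++ [x], pend) := by
          unfold pvBStep pvDegOnly pvInstOnly at *
          simp at hd hi
          rcases hD : pvGetT x "Degree" <;> rcases hI : pvGetT x "Institution" <;> simp_all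
        rw [hstep]
        simp only [if_neg hd, if_neg hi]
        have hb' : ∀ j ∈ pend, (0:Int) ≤ j ∧ j.toNat < (out ++ [x]).length := by
          intro j hj; have := hb j hj; constructor; · exact this.1
          simp; omega
        have hq : pend.map (fun j => (out ++ [x]).getD j.toNat []) = pend.map (fun j => out.getD j.toNat []) := by
          apply List.map_congr_left
          intro j hj
          exact List.getD_append _ _ _ _ (hb j hj).2
        have := ih (out ++ [x]) pend hb' hp
        rw [hq] at this
        rw [this]
        rw [pvPatch_append pend _ out [x] hb]
        simp

theorem portB_eq_phi (xs : List (List (String × String))) :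
    (xs.foldl pvBStep ([], [])).1 = (pvPhi xs []).2 := by
  have := pvB_inv xs [] [] (by intro k hk; cases hk) List.Pairwise.nil
  simp only [List.map_nil] at this
  rw [this]
  unfold pvPatch
  simp

theorem pvContains_add (s : PySem.Set Int) (x y : Int) :
    PySem.Set.contains (PySem.Set.add s x) y = (PySem.Set.contains s y || y == x) := by
  rw [Bool.eq_iff_iff]
  simp [PySem.Set.contains, PySem.Set.mem_add, beq_iff_eq]

theorem pvMask_congr : ∀ (l : List (List (String × String))) (i : Int) (u u' : PySem.Set Int),
    (∀ j : Int, i ≤ j → PySem.Set.contains u j = PySem.Set.contains u' j) →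
    pvMask i u l = pvMask i u' l := by
  intro l
  induction l with
  | nil => intro i u u' h; rfl
  | cons e l ih =>
    intro i u u' h
    unfold pvMask
    rw [h i le_rfl, ih (i+1) u u' (fun j hj => h j (by omega))]

theorem pvMask_empty : ∀ (l : List (List (String × String))) (i : Int),
    pvMask i PySem.Set.empty l = l := by
  intro l
  induction l with
  | nil => intro i; rfl
  | cons e l ih =>
    intro i
    unfold pvMask
    have : PySem.Set.contains (PySem.Set.empty : PySem.Set Int) i = false := rfl
    rw [this]
    simp only [Bool.false_eq_true, if_false]
    exact congrArg _ (ih (i+1))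

-- A's step only appends to the output; pull the accumulated prefix out of the fold
theorem pvAStep_append (xs : List (List (String × String))) (m : List (List (String × String)))
    (u : PySem.Set Int) (p : Int × List (String × String)) :
    pvAStep xs (m, u) p = (m ++ (pvAStep xs ([], u) p).1, (pvAStep xs ([], u) p).2) := by
  unfold pvAStep
  dsimp only
  split
  · simp
  · split
    · split <;> simp
    · split <;> simp

theorem pvA_fold_append (xs : List (List (String × String))) :
    ∀ (l : List (Int × List (String × String))) (m : List (List (String × String))) (u : PySem.Set Int),
    l.foldl (pvAStep xs) (m, u) = (m ++ (l.foldl (pvAStep xs) ([], u)).1, (l.foldl (pvAStep xs) ([], u)).2) := by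
  intro l
  induction l with
  | nil => intro m u; simp
  | cons p l ih =>
    intro m u
    rw [List.foldl_cons, List.foldl_cons, pvAStep_append]
    rcases hst : pvAStep xs ([], u) p with ⟨δ, u₁⟩
    rw [ih (m ++ δ) u₁, ih δ u₁]
    simp

theorem pvMask_cons (i : Int) (u : PySem.Set Int) (e : List (String × String)) (l : List (List (String × String))) :
    pvMask i u (e :: l) = if PySem.Set.contains u i = true then pvMask (i+1) u l else e :: pvMask (i+1) u l := rfl

theorem pvFind_cons (u : PySem.Set Int) (p : Int × List (String × String)) (rest : List (Int × List (String × String))) :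
    mergeEduA_find u (p :: rest) =
      if (!(PySem.Set.contains u p.1) && pvGetT p.2 "Institution" && !pvGetT p.2 "Degree") = true then some p
      else mergeEduA_find u rest := rfl

-- A's inner search over the unused tail finds exactly the first institution-only
-- element of the masked tail, and using it removes it from the mask
theorem pvFind_spec : ∀ (l : List (List (String × String))) (i : Int) (u : PySem.Set Int),
    ((pvMask i u l).dropWhile (fun y => !pvInstOnly y) = [] →
      mergeEduA_find u (PySem.List.enumerate l i) = none) ∧
    (∀ o post, (pvMask i u l).dropWhile (fun y => !pvInstOnly y) = o :: post →
      ∃ j : Int, i ≤ j ∧ PySem.Set.contains u j = false ∧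
        mergeEduA_find u (PySem.List.enumerate l i) = some (j, o) ∧
        pvMask i (PySem.Set.add u j) l = (pvMask i u l).takeWhile (fun y => !pvInstOnly y) ++ post) := by
  intro l
  induction l with
  | nil =>
    intro i u
    constructor
    · intro _; rfl
    · intro o post h; cases h
  | cons x l ih =>
    intro i u
    rw [PySem.List.enumerate_cons]
    by_cases hc : PySem.Set.contains u i = true
    · -- index i is used: skipped on both sides
      have hmask : pvMask i u (x :: l) = pvMask (i+1) u l := by
        rw [pvMask_cons, hc]; simp
      have hfind : mergeEduA_find u ((i, x) :: PySem.List.enumerate l (i+1)) =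
          mergeEduA_find u (PySem.List.enumerate l (i+1)) := by
        rw [pvFind_cons]
        dsimp only
        rw [hc]
        simp
      rw [hmask, hfind]
      obtain ⟨ih1, ih2⟩ := ih (i+1) u
      refine ⟨ih1, ?_⟩
      intro o post h
      obtain ⟨j, hj1, hj2, hj3, hj4⟩ := ih2 o post h
      refine ⟨j, by omega, hj2, hj3, ?_⟩
      have : pvMask i (PySem.Set.add u j) (x :: l) = pvMask (i+1) (PySem.Set.add u j) l := by
        rw [pvMask_cons, pvContains_add, hc]
        simp
      rw [this, hj4]
    · have hc' : PySem.Set.contains u i = false := by rw [Bool.not_eq_true] at hc; exact hc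
      have hmask : pvMask i u (x :: l) = x :: pvMask (i+1) u l := by
        rw [pvMask_cons, hc']; simp
      by_cases hinst : pvInstOnly x = true
      · -- x is the first institution-only element of the mask: found at index i
        constructor
        · intro h
          rw [hmask, List.dropWhile_cons_of_neg (by simp [hinst])] at h
          cases h
        · intro o post h
          rw [hmask, List.dropWhile_cons_of_neg (by simp [hinst])] at h
          cases h
          refine ⟨i, le_rfl, hc', ?_, ?_⟩
          · unfold pvInstOnly at hinst
            rcases hI : pvGetT x "Institution" <;> rcases hD : pvGetT x "Degree" <;>
              simp_all [pvFind_cons, hc']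
          · have h1 : pvMask i (PySem.Set.add u i) (x :: l) = pvMask (i+1) (PySem.Set.add u i) l := by
              rw [pvMask_cons, pvContains_add]
              simp
            rw [h1, hmask, List.takeWhile_cons_of_neg (by simp [hinst])]
            simp only [List.nil_append]
            exact pvMask_congr l (i+1) _ u (fun j hj => by
              have hji : (j == i) = false := by simp; omega
              rw [pvContains_add, hji]
              simp)
      · -- x stays in the mask prefix; the search skips it
        have hinst' : pvInstOnly x = false := by rw [Bool.not_eq_true] at hinst; exact hinst
        have hfind : mergeEduA_find u ((i, x) :: PySem.List.enumerate l (i+1)) =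
            mergeEduA_find u (PySem.List.enumerate l (i+1)) := by
          rw [pvFind_cons]
          unfold pvInstOnly at hinst'
          rcases hI : pvGetT x "Institution" <;> rcases hD : pvGetT x "Degree" <;> simp_all
        rw [hfind, hmask]
        obtain ⟨ih1, ih2⟩ := ih (i+1) u
        constructor
        · intro h
          rw [List.dropWhile_cons_of_pos (by simp [hinst'])] at h
          exact ih1 h
        · intro o post h
          rw [List.dropWhile_cons_of_pos (by simp [hinst'])] at h
          obtain ⟨j, hj1, hj2, hj3, hj4⟩ := ih2 o post h
          refine ⟨j, by omega, hj2, hj3, ?_⟩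
          have h1 : pvMask i (PySem.Set.add u j) (x :: l) = x :: pvMask (i+1) (PySem.Set.add u j) l := by
            rw [pvMask_cons, pvContains_add, hc']
            have : (i == j) = false := by simp; omega
            rw [this]
            simp
          rw [h1, hj4, List.takeWhile_cons_of_pos (by simp [hinst'])]
          simp

theorem pvA_main : ∀ (l xs : List (List (String × String))) (n : Nat) (u : PySem.Set Int),
    xs.drop n = l →
    ((PySem.List.enumerate l (n : Int)).foldl (pvAStep xs) ([], u)).1 = pvFRec (pvMask (n : Int) u l) := by
  intro l
  induction l with
  | nil =>
    intro xs n u _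
    simp [PySem.List.enumerate_nil, pvMask, pvFRec]
  | cons e l' ih =>
    intro xs n u h
    rw [PySem.List.enumerate_cons, List.foldl_cons]
    have hdrop' : xs.drop (n+1) = l' := by rw [List.drop_add_one_eq_tail_drop, h]; rfl
    have hcast : (n:Int) + 1 = ((n+1 : Nat) : Int) := by push_cast; ring
    by_cases hc : PySem.Set.contains u (n:Int) = true
    · -- index already used: skip the entry
      have hstep : pvAStep xs ([], u) ((n:Int), e) = ([], u) := by
        unfold pvAStep; dsimp only; rw [hc]; simp
      rw [hstep, pvMask_cons, hc]
      simp only [if_pos rfl]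
      rw [hcast]
      exact ih xs (n+1) u hdrop'
    · have hc' : PySem.Set.contains u (n:Int) = false := by rw [Bool.not_eq_true] at hc; exact hc
      rw [pvMask_cons, hc']
      simp only [Bool.false_eq_true, if_false]
      have hcongr : ∀ (j : Int), (n:Int) + 1 ≤ j →
          PySem.Set.contains (PySem.Set.add u (n:Int)) j = PySem.Set.contains u j := by
        intro j hj
        have : (j == (n:Int)) = false := by simp; omega
        rw [pvContains_add, this]
        simp
      by_cases hdeg : (pvGetT e "Degree" && !pvGetT e "Institution") = true
      · have hslice : PySem.List.slice xs (some ((n:Int)+1)) none = l' := by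
          rw [hcast, PySem.List.slice_from_natCast]; exact hdrop'
        obtain ⟨f1, f2⟩ := pvFind_spec l' ((n:Int)+1) u
        rcases hdw : (pvMask ((n:Int)+1) u l').dropWhile (fun y => !pvInstOnly y) with _ | ⟨o, post⟩
        · -- no usable institution-only entry: keep as is
          have hfind := f1 hdw
          have hstep : pvAStep xs ([], u) ((n:Int), e) = ([e], PySem.Set.add u (n:Int)) := by
            unfold pvAStep; dsimp only
            rw [hc']
            simp only [Bool.false_eq_true, if_false, hdeg, if_true]
            rw [hslice, hfind]
            simp
          rw [hstep, pvA_fold_append]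
          rw [hcast] at hdw ⊢
          rw [ih xs (n+1) (PySem.Set.add u (n:Int)) hdrop']
          rw [pvMask_congr l' ((n+1 : Nat) : Int) _ u (fun j hj => hcongr j (by omega))]
          rw [pvFRec]
          rw [show pvDegOnly e = true from hdeg]
          simp only [if_true]
          split
          · next heq => rw [hdw] at heq; cases heq
          · simp
        · -- merge with the found entry o at index j
          obtain ⟨j, hj1, hj2, hj3, hj4⟩ := f2 o post hdw
          have hstep : pvAStep xs ([], u) ((n:Int), e) =
              ([pvMergePair e o], PySem.Set.add (PySem.Set.add u (n:Int)) j) := by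
            unfold pvAStep; dsimp only
            rw [hc']
            simp only [Bool.false_eq_true, if_false, hdeg, if_true]
            rw [hslice, hj3]
            simp
          rw [hstep, pvA_fold_append]
          rw [hcast] at hdw hj4 ⊢
          have hcongr2 : ∀ (j' : Int), ((n+1 : Nat) : Int) ≤ j' →
              PySem.Set.contains (PySem.Set.add (PySem.Set.add u (n:Int)) j) j' =
                PySem.Set.contains (PySem.Set.add u j) j' := by
            intro j' hj'
            rw [pvContains_add, pvContains_add, pvContains_add]
            have : (j' == (n:Int)) = false := by simp; push_cast at hj'; omega
            rw [this]
            simp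
          rw [ih xs (n+1) (PySem.Set.add (PySem.Set.add u (n:Int)) j) hdrop']
          rw [pvMask_congr l' ((n+1 : Nat) : Int) _ _ hcongr2]
          rw [hj4]
          rw [pvFRec]
          rw [show pvDegOnly e = true from hdeg]
          simp only [if_true]
          split
          · next o2 post2 heq => rw [hdw] at heq; cases heq; simp
          · next heq => rw [hdw] at heq; cases heq
      · -- not degree-only: keep the entry
        have hdeg' : (pvGetT e "Degree" && !pvGetT e "Institution") = false := by
          rw [Bool.not_eq_true] at hdeg; exact hdeg
        have hstep : pvAStep xs ([], u) ((n:Int), e) = ([e], PySem.Set.add u (n:Int)) := by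
          unfold pvAStep; dsimp only
          rw [hc', hdeg']
          simp
        rw [hstep, pvA_fold_append]
        rw [hcast]
        rw [ih xs (n+1) (PySem.Set.add u (n:Int)) hdrop']
        rw [pvMask_congr l' ((n+1 : Nat) : Int) _ u (fun j hj => hcongr j (by omega))]
        rw [pvFRec]
        rw [show pvDegOnly e = false from hdeg']
        simp

theorem portA_eq_fRec (xs : List (List (String × String))) :
    ((PySem.List.enumerate xs 0).foldl (pvAStep xs) ([], PySem.Set.empty)).1 = pvFRec xs := by
  have := pvA_main xs xs 0 PySem.Set.empty (by simp)
  simp only [Nat.cast_zero] at this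
  rw [this, pvMask_empty]

-- ===== VERDICT (by name: the statement is the Claim_ definition above) =====
theorem merge_education_entries_py_spec : Claim_equal_merge_education_entries_py := by
  intro xs _ _
  unfold Spec_merge_education_entries_py merge_education_entries_py merge_education_entries_py_alt
  rw [portA_eq_fRec, portB_eq_phi]
  have h0 := pvFRec_phi xs [] (by intro e h; cases h)
  have h1 := pvPhi_fst_length xs []
  rcases h : (pvPhi xs []).1 with _ | ⟨a, b⟩
  · rw [h] at h0; simp at h0; rw [h0]
  · rw [h] at h1; simp at h1
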